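-- pv_equiv track=rewrite | github.com/vayric/Discord-Info-Extractor | main.py | parse_user_flags
-- ===== SOURCE A (Python) =====
-- def parse_user_flags(flags):
--     flags_map = {
--         1 << 0: 'Staff',
--         1 << 1: 'Partner',
--         1 << 3: 'Bug Hunter',
--         1 << 6: 'HypeSquad Bravery',
--         1 << 7: 'HypeSquad Brilliance',
--         1 << 8: 'HypeSquad Balance',
--         1 << 14: 'Bug Hunter Level 2',
--         1 << 18: 'Certified Moderator'
--     }
--     return [desc for bit, desc in flags_map.items() if flags & bit]
-- ===== SOURCE B (Python) =====
-- def parse_user_flags(flags):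
--     # Scan the set bits of the input (masked to the known flag bits) instead of
--     # scanning the flag table: walk bits of `flags` from the lowest up.
--     names = {
--         0: 'Staff',
--         1: 'Partner',
--         3: 'Bug Hunter',
--         6: 'HypeSquad Bravery',
--         7: 'HypeSquad Brilliance',
--         8: 'HypeSquad Balance',
--         14: 'Bug Hunter Level 2',
--         18: 'Certified Moderator',
--     }
--     m = flags & 0x441CB  # mask of all known flag bits
--     out = []
--     i = 0
--     while m:
--         if m & 1:
--             out.append(names[i])
--         m >>= 1
--         i += 1
--     return out
-- ===== Notes on version B (the rewrite author's own statement) =====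
-- stated objective: alternative
-- what changed: Instead of scanning the fixed flag table and testing each entry against the input, B masks the input to the known flag bits and walks the input's set bits from lowest to highest, looking each bit index up in a dict keyed by bit position.
import Mathlib
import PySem

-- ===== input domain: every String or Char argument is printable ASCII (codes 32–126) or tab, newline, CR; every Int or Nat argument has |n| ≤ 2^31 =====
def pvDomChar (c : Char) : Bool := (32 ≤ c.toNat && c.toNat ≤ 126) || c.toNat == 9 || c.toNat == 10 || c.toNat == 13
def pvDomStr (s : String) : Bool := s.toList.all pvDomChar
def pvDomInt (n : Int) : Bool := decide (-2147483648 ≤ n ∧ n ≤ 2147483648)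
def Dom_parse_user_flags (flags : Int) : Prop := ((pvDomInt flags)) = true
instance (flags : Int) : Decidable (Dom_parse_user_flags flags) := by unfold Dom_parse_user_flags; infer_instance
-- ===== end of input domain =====

-- B walks the set bits of the (masked) input instead of scanning the flag table; alternative decomposition, same cost on this fixed-size task.

-- ===== PORT A =====
-- flags_map, in insertion order (keys are the Python ints 1<<0, 1<<1, 1<<3, …)
def pvFlagsMap : PySem.Dict Int String := PySem.Dict.mk
  [(1, "Staff"), (2, "Partner"), (8, "Bug Hunter"), (64, "HypeSquad Bravery"),
   (128, "HypeSquad Brilliance"), (256, "HypeSquad Balance"),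
   (16384, "Bug Hunter Level 2"), (262144, "Certified Moderator")]

-- [desc for bit, desc in flags_map.items() if flags & bit]  (truthiness: flags & bit ≠ 0)
def parse_user_flags (flags : Int) : List String :=
  (pvFlagsMap.items.filter (fun p => PySem.Int.band flags p.1 != 0)).map Prod.snd

-- ===== PORT B =====
def pvNames : PySem.Dict Int String := PySem.Dict.mk
  [(0, "Staff"), (1, "Partner"), (3, "Bug Hunter"), (6, "HypeSquad Bravery"),
   (7, "HypeSquad Brilliance"), (8, "HypeSquad Balance"),
   (14, "Bug Hunter Level 2"), (18, "Certified Moderator")]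

-- while m: if m & 1: out.append(names[i]); m >>= 1; i += 1
-- `fuel` only makes the recursion total: the masked m is nonnegative and < 2^19, so 19 halvings
-- always reach 0 first; `names[i]` never raises in B because m is masked to the key bits,
-- and `.getD ""` is that always-successful lookup.
def pvBLoop (fuel : Nat) (m : Int) (i : Int) (out : List String) : List String :=
  match fuel with
  | 0 => out
  | fuel + 1 =>
    if m = 0 then out
    else
      pvBLoop fuel (m >>> (1 : Nat)) (i + 1)
        (if PySem.Int.band m 1 ≠ 0 then out ++ [(PySem.Dict.get? pvNames i).getD ""] else out)

def parse_user_flags_alt (flags : Int) : List String :=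
  pvBLoop 19 (PySem.Int.band flags 278987) 0 []   -- 278987 = 0x441CB, the mask of known flag bits

-- ===== PRECONDITION & SPEC =====
def Spec_parse_user_flags (flags : Int) (out : List String) : Prop := out = parse_user_flags_alt flags
instance (flags : Int) (out : List String) : Decidable (Spec_parse_user_flags flags out) := by unfold Spec_parse_user_flags; infer_instance

-- ===== CLAIM (what is proved, stated in full; the proofs are below) =====
def Claim_equal_parse_user_flags : Prop := ∀ (flags : Int), Dom_parse_user_flags flags → Spec_parse_user_flags flags (parse_user_flags flags)

-- ===== LEMMAS AND PROOFS =====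

-- disjoint bitwise-or is addition
theorem pvOrAdd (a b : Nat) (h : a &&& b = 0) : a ||| b = a + b := by
  induction a using Nat.strong_induction_on generalizing b with
  | _ a ih =>
  rcases Nat.eq_zero_or_pos a with rfl | ha
  · simp
  · have hdiv : a / 2 &&& b / 2 = 0 := by rw [← Nat.and_div_two, h]
    have ihd := ih (a / 2) (by omega) (b / 2) hdiv
    have hpar : a % 2 = 0 ∨ b % 2 = 0 := by
      have hb0 := congrArg (fun t => t.testBit 0) h
      simp only [Nat.testBit_zero] at hb0
      rcases Nat.mod_two_eq_zero_or_one a with h1 | h1 <;>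
        rcases Nat.mod_two_eq_zero_or_one b with h2 | h2 <;>
          simp [h1, h2] at hb0 ⊢
    have hd2 : (a ||| b) / 2 = a / 2 + b / 2 := by rw [Nat.or_div_two, ihd]
    have key : ((a ||| b) % 2 = 1) ↔ (a % 2 = 1 ∨ b % 2 = 1) := by
      simp only [Nat.mod_two_eq_one_iff_testBit_zero, Nat.testBit_or]
      simp
    have hm2 : (a ||| b) % 2 < 2 := Nat.mod_lt _ (by omega)
    omega

theorem pvDisj (n x y : Nat) (h : x &&& y = 0) : (n &&& x) &&& (n &&& y) = 0 := by
  apply Nat.zero_of_testBit_eq_false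
  intro i
  have hb := congrArg (fun t => t.testBit i) h
  simp only [Nat.testBit_and, Nat.zero_testBit] at hb ⊢
  cases hx : x.testBit i <;> cases hy : y.testBit i <;> simp_all

-- one step of peeling the lowest remaining flag bit off the mask
theorem pvPeel (n a r : Nat) (hor : a ||| r = a + r) (hd : a &&& r = 0) :
    n &&& (a + r) = (n &&& a) + (n &&& r) := by
  rw [← hor, Nat.and_or_distrib_left]
  exact pvOrAdd _ _ (pvDisj n a r hd)

-- the masked input as the sum of its flag bits
theorem pvKeySum (n : Nat) : n &&& 278987 =
    (n.testBit 0).toNat * 1 + (n.testBit 1).toNat * 2 + (n.testBit 3).toNat * 8 +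
    (n.testBit 6).toNat * 64 + (n.testBit 7).toNat * 128 + (n.testBit 8).toNat * 256 +
    (n.testBit 14).toNat * 16384 + (n.testBit 18).toNat * 262144 := by
  have s1 : n &&& 278987 = (n &&& 1) + (n &&& 278986) := pvPeel n 1 278986 (by decide) (by decide)
  have s2 : n &&& 278986 = (n &&& 2) + (n &&& 278984) := pvPeel n 2 278984 (by decide) (by decide)
  have s3 : n &&& 278984 = (n &&& 8) + (n &&& 278976) := pvPeel n 8 278976 (by decide) (by decide)
  have s4 : n &&& 278976 = (n &&& 64) + (n &&& 278912) := pvPeel n 64 278912 (by decide) (by decide)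
  have s5 : n &&& 278912 = (n &&& 128) + (n &&& 278784) := pvPeel n 128 278784 (by decide) (by decide)
  have s6 : n &&& 278784 = (n &&& 256) + (n &&& 278528) := pvPeel n 256 278528 (by decide) (by decide)
  have s7 : n &&& 278528 = (n &&& 16384) + (n &&& 262144) := pvPeel n 16384 262144 (by decide) (by decide)
  have e0 : n &&& 1 = (n.testBit 0).toNat * 1 := by simpa using Nat.and_two_pow n 0
  have e1 : n &&& 2 = (n.testBit 1).toNat * 2 := by simpa using Nat.and_two_pow n 1
  have e3 : n &&& 8 = (n.testBit 3).toNat * 8 := by simpa using Nat.and_two_pow n 3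
  have e6 : n &&& 64 = (n.testBit 6).toNat * 64 := by simpa using Nat.and_two_pow n 6
  have e7 : n &&& 128 = (n.testBit 7).toNat * 128 := by simpa using Nat.and_two_pow n 7
  have e8 : n &&& 256 = (n.testBit 8).toNat * 256 := by simpa using Nat.and_two_pow n 8
  have e14 : n &&& 16384 = (n.testBit 14).toNat * 16384 := by simpa using Nat.and_two_pow n 14
  have e18 : n &&& 262144 = (n.testBit 18).toNat * 262144 := by simpa using Nat.and_two_pow n 18
  omega

-- the flag test of A, keyed by bit value, as a pure boolean selection
def pvSel (b0 b1 b3 b6 b7 b8 b14 b18 : Bool) (k : Int) : Bool :=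
  if k = 1 then b0 else if k = 2 then b1 else if k = 8 then b3 else if k = 64 then b6
  else if k = 128 then b7 else if k = 256 then b8 else if k = 16384 then b14
  else if k = 262144 then b18 else false

-- both table scan and bit walk, for every combination of the 8 flag bits
theorem pvCombined (b0 b1 b3 b6 b7 b8 b14 b18 : Bool) :
    (pvFlagsMap.items.filter (fun p => pvSel b0 b1 b3 b6 b7 b8 b14 b18 p.1)).map Prod.snd =
      pvBLoop 19 ((b0.toNat * 1 + b1.toNat * 2 + b3.toNat * 8 + b6.toNat * 64 + b7.toNat * 128 +
        b8.toNat * 256 + b14.toNat * 16384 + b18.toNat * 262144 : Nat) : Int) 0 [] := by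
  cases b0 <;> cases b1 <;> cases b3 <;> cases b6 <;> cases b7 <;> cases b8 <;> cases b14 <;>
    cases b18 <;> decide


theorem pvCondPos (n k : Nat) (b : Int) (hb : b = ((2 ^ k : Nat) : Int)) :
    (PySem.Int.band (n : Int) b != 0) = n.testBit k := by
  subst hb
  rw [PySem.Int.band_natCast, Nat.and_two_pow]
  cases h : n.testBit k <;> simp

theorem pvCondNeg (c k : Nat) (b : Int) (hb : b = ((2 ^ k : Nat) : Int)) :
    (PySem.Int.band (-(c : Int) - 1) b != 0) = !c.testBit k := by
  subst hb
  rw [PySem.Int.band, if_neg (by omega), if_pos (by positivity)]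
  have h1 : (-(-(c : Int) - 1) - 1) = (c : Int) := by ring
  rw [h1]
  simp only [Int.toNat_natCast]
  rw [Nat.and_comm, Nat.and_two_pow]
  cases h : c.testBit k <;> simp

theorem pvBandNegMask (c : Nat) :
    PySem.Int.band (-(c : Int) - 1) 278987 = ((278987 - (c &&& 278987) : Nat) : Int) := by
  have hb : (278987 : Int) = ((278987 : Nat) : Int) := by norm_num
  rw [hb, PySem.Int.band, if_neg (by omega), if_pos (by positivity)]
  have h1 : (-(-(c : Int) - 1) - 1) = (c : Int) := by ring
  rw [h1]
  simp only [Int.toNat_natCast]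
  rw [Nat.and_comm]

-- complementing the flag bits under the mask
theorem pvNegSum (b0 b1 b3 b6 b7 b8 b14 b18 : Bool) :
    (278987 - (b0.toNat * 1 + b1.toNat * 2 + b3.toNat * 8 + b6.toNat * 64 + b7.toNat * 128 +
        b8.toNat * 256 + b14.toNat * 16384 + b18.toNat * 262144) : Nat) =
      (!b0).toNat * 1 + (!b1).toNat * 2 + (!b3).toNat * 8 + (!b6).toNat * 64 + (!b7).toNat * 128 +
        (!b8).toNat * 256 + (!b14).toNat * 16384 + (!b18).toNat * 262144 := by
  cases b0 <;> cases b1 <;> cases b3 <;> cases b6 <;> cases b7 <;> cases b8 <;> cases b14 <;>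
    cases b18 <;> rfl

-- ===== VERDICT (by name: the statement is the Claim_ definition above) =====

theorem parse_user_flags_spec : Claim_equal_parse_user_flags := by
  intro flags _
  show parse_user_flags flags = parse_user_flags_alt flags
  unfold parse_user_flags parse_user_flags_alt
  rcases le_or_gt (0:Int) flags with hpos | hneg
  · obtain ⟨n, rfl⟩ : ∃ n : Nat, flags = (n : Int) := ⟨flags.toNat, (Int.toNat_of_nonneg hpos).symm⟩
    have hmask : PySem.Int.band (n : Int) 278987 = ((n &&& 278987 : Nat) : Int) := by
      have hb : (278987 : Int) = ((278987 : Nat) : Int) := by norm_num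
      rw [hb, PySem.Int.band_natCast]
    rw [hmask, pvKeySum n]
    rw [List.filter_congr (q := fun p => pvSel (n.testBit 0) (n.testBit 1) (n.testBit 3)
      (n.testBit 6) (n.testBit 7) (n.testBit 8) (n.testBit 14) (n.testBit 18) p.1) ?_]
    · exact pvCombined (n.testBit 0) (n.testBit 1) (n.testBit 3) (n.testBit 6) (n.testBit 7)
        (n.testBit 8) (n.testBit 14) (n.testBit 18)
    · intro p hp
      fin_cases hp
      · simpa [pvSel] using pvCondPos n 0 1 (by norm_num)
      · simpa [pvSel] using pvCondPos n 1 2 (by norm_num)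
      · simpa [pvSel] using pvCondPos n 3 8 (by norm_num)
      · simpa [pvSel] using pvCondPos n 6 64 (by norm_num)
      · simpa [pvSel] using pvCondPos n 7 128 (by norm_num)
      · simpa [pvSel] using pvCondPos n 8 256 (by norm_num)
      · simpa [pvSel] using pvCondPos n 14 16384 (by norm_num)
      · simpa [pvSel] using pvCondPos n 18 262144 (by norm_num)
  · obtain ⟨c, rfl⟩ : ∃ c : Nat, flags = -(c : Int) - 1 :=
      ⟨(-flags - 1).toNat, by
        have h := Int.toNat_of_nonneg (a := -flags - 1) (by omega); omega⟩
    rw [pvBandNegMask c, pvKeySum c, pvNegSum]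
    rw [List.filter_congr (q := fun p => pvSel (!c.testBit 0) (!c.testBit 1) (!c.testBit 3)
      (!c.testBit 6) (!c.testBit 7) (!c.testBit 8) (!c.testBit 14) (!c.testBit 18) p.1) ?_]
    · exact pvCombined (!c.testBit 0) (!c.testBit 1) (!c.testBit 3) (!c.testBit 6) (!c.testBit 7)
        (!c.testBit 8) (!c.testBit 14) (!c.testBit 18)
    · intro p hp
      fin_cases hp
      · simpa [pvSel] using pvCondNeg c 0 1 (by norm_num)
      · simpa [pvSel] using pvCondNeg c 1 2 (by norm_num)
      · simpa [pvSel] using pvCondNeg c 3 8 (by norm_num)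
      · simpa [pvSel] using pvCondNeg c 6 64 (by norm_num)
      · simpa [pvSel] using pvCondNeg c 7 128 (by norm_num)
      · simpa [pvSel] using pvCondNeg c 8 256 (by norm_num)
      · simpa [pvSel] using pvCondNeg c 14 16384 (by norm_num)
      · simpa [pvSel] using pvCondNeg c 18 262144 (by norm_num)
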